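-- pv_equiv track=rewrite | github.com/yeeshue99/Daily-Coding | CoderPro_Ransom_Note.py | CanSpell
-- ===== SOURCE A (Python) =====
-- from collections import defaultdict
--
-- def CanSpell(mag, word):
--     numLetters = defaultdict(int)
--     for letter in mag:
--         if letter in numLetters:
--             numLetters[letter] = numLetters[letter] + 1
--         else:
--             numLetters[letter] = 1
--
--     for letter in word:
--         if letter in numLetters and numLetters[letter] > 0:
--             numLetters[letter] -= 1
--         else:
--             return False
--
--     return True
-- ===== SOURCE B (Python) =====
-- def CanSpell(mag, word):
--     mc = {}
--     for c in mag:
--         mc[c] = mc.get(c, 0) + 1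
--     wc = {}
--     for c in word:
--         wc[c] = wc.get(c, 0) + 1
--     return all(mc.get(c, 0) >= n for c, n in wc.items())
-- ===== Notes on version B (the rewrite author's own statement) =====
-- stated objective: simpler
-- what changed: Replaces A's scan-over-word with per-letter decrement and early return by building frequency tables for both strings once and comparing them per distinct letter with all(...).
import Mathlib
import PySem

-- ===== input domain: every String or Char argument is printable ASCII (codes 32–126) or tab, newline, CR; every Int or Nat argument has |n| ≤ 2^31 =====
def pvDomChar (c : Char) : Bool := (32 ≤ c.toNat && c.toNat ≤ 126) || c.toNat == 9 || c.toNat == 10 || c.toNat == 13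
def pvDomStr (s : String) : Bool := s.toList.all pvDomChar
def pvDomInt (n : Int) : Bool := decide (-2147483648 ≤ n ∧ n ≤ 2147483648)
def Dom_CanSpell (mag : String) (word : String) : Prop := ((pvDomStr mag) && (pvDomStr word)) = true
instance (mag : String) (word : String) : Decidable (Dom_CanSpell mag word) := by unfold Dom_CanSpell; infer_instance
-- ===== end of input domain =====

-- B builds frequency tables for both mag and word once and compares them per distinct
-- letter with all(...), instead of A's decrement-with-early-return scan over word (objective: simpler).


-- ===== PORT A =====
-- A's second loop: decrement the counter per letter of word, early-return False
def CanSpellLoop : List Char → PySem.Dict Char Int → Bool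
  | [], _ => true
  | c :: rest, d =>
      if d.contains c && decide (0 < d.getD c 0) then
        CanSpellLoop rest (d.insert c (d.getD c 0 - 1))
      else
        false

def CanSpell (mag : String) (word : String) : Bool :=
  let numLetters : PySem.Dict Char Int :=
    mag.toList.foldl (fun d letter =>
      if d.contains letter then d.insert letter (d.getD letter 0 + 1)
      else d.insert letter 1) PySem.Dict.empty
  CanSpellLoop word.toList numLetters

-- ===== PORT B =====
def CanSpell_alt (mag : String) (word : String) : Bool :=
  let mc : PySem.Dict Char Int :=
    mag.toList.foldl (fun d c => d.insert c (d.getD c 0 + 1)) PySem.Dict.empty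
  let wc : PySem.Dict Char Int :=
    word.toList.foldl (fun d c => d.insert c (d.getD c 0 + 1)) PySem.Dict.empty
  wc.items.all (fun p => decide (p.2 ≤ mc.getD p.1 0))

-- ===== PRECONDITION & SPEC =====
def Spec_CanSpell (mag : String) (word : String) (out : Bool) : Prop := out = CanSpell_alt mag word
instance (mag : String) (word : String) (out : Bool) : Decidable (Spec_CanSpell mag word out) := by unfold Spec_CanSpell; infer_instance

-- ===== CLAIM (what is proved, stated in full; the proofs are below) =====
def Claim_equal_CanSpell : Prop := ∀ (mag : String) (word : String), Dom_CanSpell mag word → Spec_CanSpell mag word (CanSpell mag word)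

-- ===== LEMMAS AND PROOFS =====

-- A's membership-guarded increment builds the same counts as a plain counter
lemma getD_foldA (l : List Char) (d : PySem.Dict Char Int) (c : Char) :
    (l.foldl (fun d letter =>
      if d.contains letter then d.insert letter (d.getD letter 0 + 1)
      else d.insert letter 1) d).getD c 0 = d.getD c 0 + l.count c := by
  induction l generalizing d with
  | nil => simp
  | cons c' l ih =>
      simp only [List.foldl_cons]
      by_cases h : d.contains c' = true
      · rw [if_pos h, ih, PySem.Dict.getD_insert]
        by_cases hc : c = c'
        · subst hc; simp; ring
        · have hc' : ¬ c' = c := fun e => hc e.symm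
          simp [hc, hc']
      · have h' : d.contains c' = false := by simpa using h
        rw [if_neg (by simp [h']), ih, PySem.Dict.getD_insert]
        by_cases hc : c = c'
        · subst hc
          rw [PySem.Dict.getD_of_not_contains d 0 h']
          simp
          omega
        · have hc' : ¬ c' = c := fun e => hc e.symm
          simp [hc, hc']

lemma loop_iff (ws : List Char) (d : PySem.Dict Char Int) :
    CanSpellLoop ws d = true ↔ ∀ c ∈ ws, (ws.count c : Int) ≤ d.getD c 0 := by
  induction ws generalizing d with
  | nil => simp [CanSpellLoop]
  | cons c rest ih =>
      have hcond : (d.contains c && decide (0 < d.getD c 0)) = decide (0 < d.getD c 0) := by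
        by_cases h : d.contains c = true
        · rw [h, Bool.true_and]
        · have h' : d.contains c = false := by simpa using h
          simp [h', PySem.Dict.getD_of_not_contains d 0 h']
      rw [CanSpellLoop, hcond]
      by_cases hpos : 0 < d.getD c 0
      · rw [if_pos (by simpa using hpos), ih]
        constructor
        · intro h x hx
          rcases List.mem_cons.mp hx with hxc | hx
          · subst hxc
            by_cases hm : x ∈ rest
            · have := h x hm
              rw [PySem.Dict.getD_insert, if_pos rfl] at this
              simp only [List.count_cons, beq_self_eq_true, if_true]
              push_cast; omega
            · simp [List.count_eq_zero_of_not_mem hm]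
              omega
          · have := h x hx
            rw [PySem.Dict.getD_insert] at this
            by_cases hxc : x = c
            · subst hxc
              rw [if_pos rfl] at this
              simp only [List.count_cons, beq_self_eq_true, if_true]
              push_cast; omega
            · rw [if_neg hxc] at this
              have hxc' : ¬ c = x := fun e => hxc e.symm
              simp only [List.count_cons, beq_iff_eq, hxc', if_false]
              simpa using this
        · intro h x hx
          rw [PySem.Dict.getD_insert]
          by_cases hxc : x = c
          · subst hxc
            have := h x (by simp)
            simp only [List.count_cons, beq_self_eq_true, if_true] at this
            rw [if_pos rfl]
            push_cast at this ⊢; omega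
          · have := h x (List.mem_cons_of_mem _ hx)
            have hxc' : ¬ c = x := fun e => hxc e.symm
            simp only [List.count_cons, beq_iff_eq, hxc', if_false] at this
            rw [if_neg hxc]
            simpa using this
      · rw [if_neg (by simpa using hpos)]
        simp only [Bool.false_eq_true, false_iff, not_forall]
        refine ⟨c, by simp, ?_⟩
        simp only [List.count_cons, beq_self_eq_true, if_true]
        push_cast
        omega

-- A returns true iff word's letter multiset is contained in mag's
lemma CanSpell_iff (mag word : String) :
    CanSpell mag word = true ↔
      ∀ c ∈ word.toList, (word.toList.count c : Int) ≤ (mag.toList.count c : Int) := by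
  unfold CanSpell
  rw [loop_iff]
  constructor <;> intro h c hc <;> have := h c hc <;>
    simpa [getD_foldA] using this

-- B returns true iff word's letter multiset is contained in mag's
lemma CanSpell_alt_iff (mag word : String) :
    CanSpell_alt mag word = true ↔
      ∀ c ∈ word.toList, (word.toList.count c : Int) ≤ (mag.toList.count c : Int) := by
  unfold CanSpell_alt
  rw [PySem.Dict.foldl_insert_getD_add_one_eq_counter,
      PySem.Dict.foldl_insert_getD_add_one_eq_counter,
      List.all_eq_true]
  constructor
  · intro h c hc
    have := h (c, (word.toList.count c : Int))
      (by rw [PySem.Dict.items_counter]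
          exact List.mem_map_of_mem ((PySem.Set.mem_ofList _ _).mpr hc))
    simpa [PySem.Dict.getD_counter] using this
  · intro h p hp
    rw [PySem.Dict.items_counter] at hp
    rcases List.mem_map.mp hp with ⟨k, hk, rfl⟩
    have hkmem : k ∈ word.toList := (PySem.Set.mem_ofList _ _).mp hk
    simpa [PySem.Dict.getD_counter] using h k hkmem

-- ===== VERDICT (by name: the statement is the Claim_ definition above) =====
theorem CanSpell_spec : Claim_equal_CanSpell := by
  intro mag word _
  unfold Spec_CanSpell
  rw [Bool.eq_iff_iff, CanSpell_iff, CanSpell_alt_iff]
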